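-- pv_equiv track=rewrite | github.com/stevenyoungs/gramps | gramps/gen/fs/person/mixins/helpers.py | _pretty_tags
-- ===== SOURCE A (Python) =====
-- def _pretty_tags(tags: list[str]) -> str:
--     labs: list[str] = []
--     for t in tags:
--         try:
--             if t.startswith("http://gedcomx.org/"):
--                 labs.append(t.split("/")[-1])
--             else:
--                 labs.append(t)
--         except Exception:
--             pass
--
--     order = [
--         "Birth",
--         "Baptism",
--         "Christening",
--         "Marriage",
--         "Divorce",
--         "Death",
--         "Burial",
--         "Gender",
--         "Name",
--     ]
--     labs = sorted(
--         set(labs),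
--         key=lambda x: (order.index(x) if x in order else 99, x),
--     )
--     return ", ".join(labs)
-- ===== SOURCE B (Python) =====
-- ORDER = [
--     "Birth",
--     "Baptism",
--     "Christening",
--     "Marriage",
--     "Divorce",
--     "Death",
--     "Burial",
--     "Gender",
--     "Name",
-- ]
--
--
-- def _label(t: str) -> str:
--     if t.startswith("http://gedcomx.org/"):
--         return t.split("/")[-1]
--     return t
--
--
-- def _pretty_tags(tags: list[str]) -> str:
--     seen = set(map(_label, tags))
--     prioritized = [o for o in ORDER if o in seen]
--     rest = sorted(x for x in seen if x not in ORDER)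
--     return ", ".join(prioritized + rest)
-- ===== Notes on version B (the rewrite author's own statement) =====
-- stated objective: alternative
-- what changed: Replaces the single tuple-keyed sort over the deduped labels by a bucket pass: one sweep over the fixed priority list collects present labels in priority order, then only the leftover labels (not in the priority list) are sorted alphabetically and appended; the append-loop label transform becomes a map through a helper.
import Mathlib
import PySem

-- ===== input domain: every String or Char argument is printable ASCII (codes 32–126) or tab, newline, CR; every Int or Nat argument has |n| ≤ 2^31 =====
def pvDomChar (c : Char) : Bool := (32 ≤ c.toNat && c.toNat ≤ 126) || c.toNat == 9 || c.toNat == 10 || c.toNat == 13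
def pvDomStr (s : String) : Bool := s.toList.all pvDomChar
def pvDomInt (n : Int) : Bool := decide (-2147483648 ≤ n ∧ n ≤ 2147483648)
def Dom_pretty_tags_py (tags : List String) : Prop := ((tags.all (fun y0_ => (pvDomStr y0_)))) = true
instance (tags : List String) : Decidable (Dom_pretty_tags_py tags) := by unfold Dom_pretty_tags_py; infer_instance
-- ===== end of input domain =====

-- B replaces A's single tuple-keyed sort of the deduped labels by a bucket pass over the fixed
-- priority list followed by an alphabetical sort of only the leftover labels (objective: alternative).

-- the fixed priority list (the `order` local of both Pythons)
def pvOrder : List String :=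
  ["Birth", "Baptism", "Christening", "Marriage", "Divorce", "Death", "Burial", "Gender", "Name"]

-- ===== PORT A =====
-- A's sort key `(order.index(x) if x in order else 99, x)`: the first component
def pvKeyIdx (x : String) : Int :=
  if pvOrder.contains x then
    match PySem.List.index? pvOrder x with
    | some k => (k : Int)
    | none => 99
  else 99

-- Python's tuple key (int, str) compares lexicographically: ported as the single key
-- `toLex (pvKeyIdx x, x)` into `Int ×ₗ String`, whose `<` is exactly that lexicographic order.
-- `t.split("/")` is never empty, so `.getD ""` for the `[-1]` access is exact; the
-- `try/except` can never fire on a str and is not ported.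
def pretty_tags_py (tags : List String) : String :=
  let labs : List String := tags.foldl (fun labs t =>
    if PySem.Str.startswith t "http://gedcomx.org/" then
      labs ++ [(PySem.List.pyGet? ((PySem.Str.split? t "/").getD []) (-1)).getD ""]
    else labs ++ [t]) []
  let labs2 := PySem.List.sorted (PySem.Set.ofList labs) (fun x => toLex (pvKeyIdx x, x))
  PySem.Str.join ", " labs2

-- ===== PORT B =====
-- Source B's helper `_label`
def pvLabel (t : String) : String :=
  if PySem.Str.startswith t "http://gedcomx.org/" then
    (PySem.List.pyGet? ((PySem.Str.split? t "/").getD []) (-1)).getD ""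
  else t

def pretty_tags_py_alt (tags : List String) : String :=
  let seen : PySem.Set String := PySem.Set.ofList (tags.map pvLabel)
  let prioritized := pvOrder.filter (fun o => PySem.Set.contains seen o)
  let rest := PySem.List.sorted (seen.filter (fun x => !(pvOrder.contains x))) (fun x => x)
  PySem.Str.join ", " (prioritized ++ rest)

-- ===== PRECONDITION & SPEC =====
def Spec_pretty_tags_py (tags : List String) (out : String) : Prop := out = pretty_tags_py_alt tags
instance (tags : List String) (out : String) : Decidable (Spec_pretty_tags_py tags out) := by unfold Spec_pretty_tags_py; infer_instance

-- ===== CLAIM (what is proved, stated in full; the proofs are below) =====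
def Claim_equal_pretty_tags_py : Prop := ∀ (tags : List String), Dom_pretty_tags_py tags → Spec_pretty_tags_py tags (pretty_tags_py tags)

-- ===== LEMMAS AND PROOFS =====

-- A's append loop builds exactly the mapped list
lemma pvLabs_eq (tags acc : List String) :
    tags.foldl (fun labs t =>
      if PySem.Str.startswith t "http://gedcomx.org/" then
        labs ++ [(PySem.List.pyGet? ((PySem.Str.split? t "/").getD []) (-1)).getD ""]
      else labs ++ [t]) acc = acc ++ tags.map pvLabel := by
  induction tags generalizing acc with
  | nil => simp
  | cons h t ih =>
    simp only [List.foldl_cons, List.map_cons]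
    rw [ih, show (if PySem.Str.startswith h "http://gedcomx.org/" then
          acc ++ [(PySem.List.pyGet? ((PySem.Str.split? h "/").getD []) (-1)).getD ""]
        else acc ++ [h]) = acc ++ [pvLabel h] from by unfold pvLabel; split <;> rfl]
    simp

lemma pvOrder_nodup : pvOrder.Nodup := by decide

lemma pvOrder_pairwise_key :
    List.Pairwise (fun a b : String => toLex (pvKeyIdx a, a) < toLex (pvKeyIdx b, b)) pvOrder := by
  decide

lemma pvKeyIdx_lt_of_mem (a : String) (h : a ∈ pvOrder) : pvKeyIdx a < 99 := by
  fin_cases h <;> decide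

lemma pvKeyIdx_of_not_mem (a : String) (h : a ∉ pvOrder) : pvKeyIdx a = 99 := by
  unfold pvKeyIdx
  rw [if_neg]
  simpa using h

-- the bucket construction IS sorted-by-key, for any nodup label set
lemma pvSorted_eq (s : List String) (hnd : s.Nodup) :
    PySem.List.sorted s (fun x => toLex (pvKeyIdx x, x)) =
      pvOrder.filter (fun o => PySem.Set.contains s o) ++
        PySem.List.sorted (s.filter (fun x => !(pvOrder.contains x))) (fun x => x) := by
  have hrestperm := PySem.List.sorted_perm (s.filter (fun x => !(pvOrder.contains x))) (fun x => x) false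
  have hrest_nodup : (PySem.List.sorted (s.filter (fun x => !(pvOrder.contains x))) (fun x => x)).Nodup :=
    hrestperm.nodup_iff.mpr (hnd.filter _)
  have hprio_nodup : (pvOrder.filter (fun o => PySem.Set.contains s o)).Nodup :=
    pvOrder_nodup.filter _
  have hmem_rest : ∀ b ∈ PySem.List.sorted (s.filter (fun x => !(pvOrder.contains x))) (fun x => x),
      b ∈ s ∧ b ∉ pvOrder := by
    intro b hb
    rw [PySem.List.mem_sorted] at hb
    simp only [List.mem_filter, Bool.not_eq_eq_eq_not, Bool.not_true] at hb
    refine ⟨hb.1, ?_⟩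
    simpa using hb.2
  apply PySem.List.sorted_eq_of_perm_of_pairwise_lt
  · -- permutation
    rw [List.perm_ext_iff_of_nodup (by
      refine List.Nodup.append hprio_nodup hrest_nodup ?_
      intro a ha hb
      have := (hmem_rest a hb).2
      exact this (List.mem_filter.mp ha).1) hnd]
    intro a
    simp only [List.mem_append, List.mem_filter, PySem.List.mem_sorted,
      Bool.not_eq_eq_eq_not, Bool.not_true]
    constructor
    · rintro (⟨_, h⟩ | ⟨h, _⟩)
      · simpa [PySem.Set.contains] using h
      · exact h
    · intro ha
      by_cases ho : a ∈ pvOrder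
      · exact Or.inl ⟨ho, by simpa [PySem.Set.contains] using ha⟩
      · exact Or.inr ⟨ha, by simpa using ho⟩
  · -- strictly increasing key along the bucket concatenation
    rw [List.pairwise_append]
    refine ⟨?_, ?_, ?_⟩
    · exact List.Pairwise.sublist List.filter_sublist pvOrder_pairwise_key
    · have hle := PySem.List.sorted_pairwise (s.filter (fun x => !(pvOrder.contains x))) (fun x => x)
      have hlt : List.Pairwise (fun a b : String => a < b)
          (PySem.List.sorted (s.filter (fun x => !(pvOrder.contains x))) (fun x => x)) := by
        have hne := hrest_nodup
        exact (hne.and hle).imp (fun h => lt_of_le_of_ne h.2 h.1)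
      refine hlt.imp_of_mem ?_
      intro a b ha hb hab
      rw [Prod.Lex.toLex_lt_toLex]
      exact Or.inr ⟨by rw [pvKeyIdx_of_not_mem a (hmem_rest a ha).2,
        pvKeyIdx_of_not_mem b (hmem_rest b hb).2], hab⟩
    · intro a ha b hb
      rw [Prod.Lex.toLex_lt_toLex]
      refine Or.inl ?_
      rw [pvKeyIdx_of_not_mem b (hmem_rest b hb).2]
      exact pvKeyIdx_lt_of_mem a (List.mem_filter.mp ha).1

-- ===== VERDICT (by name: the statement is the Claim_ definition above) =====
theorem pretty_tags_py_spec : Claim_equal_pretty_tags_py := by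
  intro tags _
  unfold Spec_pretty_tags_py pretty_tags_py pretty_tags_py_alt
  simp only [pvLabs_eq, List.nil_append,
    pvSorted_eq _ (PySem.Set.nodup_ofList (tags.map pvLabel))]
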